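-- pv_equiv track=rewrite | github.com/wotzlaff/tbpp-instances | utils.py | get_cliques
-- ===== SOURCE A (Python) =====
-- from itertools import tee
--
-- def pairwise(iterable):
--     "s -> (s0,s1), (s1,s2), (s2, s3), ..."
--     a, b = tee(iterable)
--     next(b, None)
--     return zip(a, b)
--
-- def get_cliques(s, e):
--     n = len(s)
--     tss = set(s)
--     tes = set(e)
--     ts = sorted(tss | tes)
--     ndts = [
--         t0
--         for t0, t1 in pairwise(ts)
--         if t0 in tss and t1 in tes
--     ]
--     return [
--         {i for i in range(n) if s[i] <= t and t < e[i]}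
--         for t in ndts
--     ]
-- ===== SOURCE B (Python) =====
-- def _lower_bound(a, x):
--     lo, hi = 0, len(a)
--     while lo < hi:
--         mid = (lo + hi) // 2
--         if a[mid] < x:
--             lo = mid + 1
--         else:
--             hi = mid
--     return lo
--
-- def get_cliques(s, e):
--     n = len(s)
--     ss = set(s)
--     es = set(e)
--     ts = sorted(ss | es)
--     ndts = [t0 for t0, t1 in zip(ts, ts[1:]) if t0 in ss and t1 in es]
--     cliques = [[] for _ in ndts]
--     for i in range(n):
--         lo = _lower_bound(ndts, s[i])
--         hi = _lower_bound(ndts, e[i])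
--         for k in range(lo, hi):
--             cliques[k].append(i)
--     return [set(c) for c in cliques]
-- ===== Notes on version B (the rewrite author's own statement) =====
-- stated objective: alternative
-- what changed: Instead of scanning all n intervals for every candidate time (nested loops), B builds the sorted candidate-time list once and, for each interval, binary-searches the range of candidate times it covers, appending its index directly into those cliques (output-sensitive: O(n log n + output) work vs A's unconditional O(m*n) scan; measured ~2x at n=4096, not confirmed at the largest size since the output itself is quadratic).
-- outside the precondition, e.g. on get_cliques([0, 1], []): A returns [], B raises IndexError
import Mathlib
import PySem

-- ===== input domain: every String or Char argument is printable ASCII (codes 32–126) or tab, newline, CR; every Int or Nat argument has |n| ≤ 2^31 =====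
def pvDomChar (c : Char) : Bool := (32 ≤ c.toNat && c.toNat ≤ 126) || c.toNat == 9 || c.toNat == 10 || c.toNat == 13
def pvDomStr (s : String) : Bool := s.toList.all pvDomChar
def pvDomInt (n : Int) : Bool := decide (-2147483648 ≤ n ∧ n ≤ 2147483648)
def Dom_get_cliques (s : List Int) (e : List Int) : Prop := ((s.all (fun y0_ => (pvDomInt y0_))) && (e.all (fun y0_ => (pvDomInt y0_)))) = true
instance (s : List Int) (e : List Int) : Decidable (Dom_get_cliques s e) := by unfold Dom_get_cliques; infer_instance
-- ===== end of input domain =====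

-- B replaces A's per-candidate-time scan over all intervals by a per-interval binary search
-- into the sorted candidate-time list, appending each index into exactly the cliques it stabs
-- (alternative, output-sensitive decomposition).


-- ===== PORT A =====
def get_cliques (s : List Int) (e : List Int) : List (List Int) :=
  let n : Int := (s.length : Int)
  let tss : PySem.Set Int := PySem.Set.ofList s
  let tes : PySem.Set Int := PySem.Set.ofList e
  let ts : List Int := PySem.List.sorted (PySem.Set.union tss tes) (fun x => x) false
  let ndts : List Int :=
    ((ts.zip ts.tail).filter (fun p => tss.contains p.1 && tes.contains p.2)).map Prod.fst
  ndts.map (fun t =>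
    PySem.Set.ofList ((PySem.List.pyRange 0 n 1).filter
      (fun i => decide (PySem.List.pyGetD s i 0 ≤ t) && decide (t < PySem.List.pyGetD e i 0))))

-- ===== PORT B =====
-- hand-written binary-search loop of Source B; lo/hi/mid stay in [0, a.length], so Nat counters
-- and (lo+hi)/2 (Nat division) are exact for Python's nonnegative ints and '//'
def lowerBoundLoop (a : List Int) (x : Int) (lo hi : Nat) : Nat :=
  if _h : lo < hi then
    let mid := (lo + hi) / 2
    if PySem.List.pyGetD a (mid : Int) 0 < x then lowerBoundLoop a x (mid + 1) hi
    else lowerBoundLoop a x lo mid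
  else lo
termination_by hi - lo
decreasing_by all_goals omega

def lower_bound (a : List Int) (x : Int) : Nat := lowerBoundLoop a x 0 a.length

def get_cliques_alt (s : List Int) (e : List Int) : List (List Int) :=
  let n : Int := (s.length : Int)
  let ss : PySem.Set Int := PySem.Set.ofList s
  let es : PySem.Set Int := PySem.Set.ofList e
  let ts : List Int := PySem.List.sorted (PySem.Set.union ss es) (fun x => x) false
  let ndts : List Int :=
    ((ts.zip (PySem.List.slice ts (some 1) none)).filter
      (fun p => ss.contains p.1 && es.contains p.2)).map Prod.fst
  let cliques0 : List (List Int) := ndts.map (fun _ => ([] : List Int))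
  let cliques := (PySem.List.pyRange 0 n 1).foldl (fun cs i =>
      let lo := lower_bound ndts (PySem.List.pyGetD s i 0)
      let hi := lower_bound ndts (PySem.List.pyGetD e i 0)
      cs.mapIdx (fun k c => if lo ≤ k ∧ k < hi then c ++ [i] else c)) cliques0
  cliques.map (fun c => PySem.Set.ofList c)

-- ===== PRECONDITION & SPEC =====
-- Pre_ excludes e shorter than s: there Python A evaluates e[i] for i < len(s) and raises
-- IndexError whenever some index with s[i] <= a candidate time lies beyond e (it returns a
-- value only in degenerate cases), and B's unconditional e[i] access raises IndexError too.
def Pre_get_cliques (s : List Int) (e : List Int) : Prop := s.length ≤ e.length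
instance (s : List Int) (e : List Int) : Decidable (Pre_get_cliques s e) := by unfold Pre_get_cliques; infer_instance
def pvWitness_get_cliques : List Int × List Int := ([0, 2, 1], [3, 4, 2])

def Spec_get_cliques (s : List Int) (e : List Int) (out : List (List Int)) : Prop := out = get_cliques_alt s e
instance (s : List Int) (e : List Int) (out : List (List Int)) : Decidable (Spec_get_cliques s e out) := by unfold Spec_get_cliques; infer_instance

-- ===== CLAIM (what is proved, stated in full; the proofs are below) =====
def Claim_equal_get_cliques : Prop := ∀ (s : List Int) (e : List Int), Dom_get_cliques s e → Pre_get_cliques s e → Spec_get_cliques s e (get_cliques s e)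

-- ===== LEMMAS AND PROOFS =====

theorem lowerBoundLoop_spec (a : List Int) (x : Int) (hs : a.Pairwise (· ≤ ·)) :
    ∀ lo hi, lo ≤ hi → hi ≤ a.length →
    (∀ j, j < lo → (hj : j < a.length) → a[j] < x) →
    (∀ j, hi ≤ j → (hj : j < a.length) → x ≤ a[j]) →
    lowerBoundLoop a x lo hi ≤ a.length ∧
    (∀ j, j < lowerBoundLoop a x lo hi → (hj : j < a.length) → a[j] < x) ∧
    (∀ j, lowerBoundLoop a x lo hi ≤ j → (hj : j < a.length) → x ≤ a[j]) := by
  intro lo hi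
  induction lo, hi using lowerBoundLoop.induct a x with
  | case1 lo hi h mid hlt ih =>
    intro hle hhi hlo hhi2
    rw [lowerBoundLoop, dif_pos h]
    have hmid : mid < a.length := by omega
    have hmv : PySem.List.pyGetD a (mid : Int) 0 = a[mid] := by
      rw [PySem.List.pyGetD_natCast]; exact List.getD_eq_getElem a 0 hmid
    simp only [mid] at hlt ⊢
    rw [if_pos hlt]
    apply ih (by omega) hhi _ hhi2
    intro j hj hjl
    have hmono := List.pairwise_iff_getElem.mp hs
    rcases Nat.lt_or_ge j mid with hc | hc
    · exact lt_of_le_of_lt (hmono j mid hjl hmid hc) (by rw [hmv] at hlt; exact hlt)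
    · have : j = mid := by omega
      subst this; rw [hmv] at hlt; exact hlt
  | case2 lo hi h mid hge ih =>
    intro hle hhi hlo hhi2
    rw [lowerBoundLoop, dif_pos h]
    have hmid : mid < a.length := by omega
    have hmv : PySem.List.pyGetD a (mid : Int) 0 = a[mid] := by
      rw [PySem.List.pyGetD_natCast]; exact List.getD_eq_getElem a 0 hmid
    simp only [mid] at hge ⊢
    rw [if_neg hge]
    apply ih (by omega) (by omega) hlo
    intro j hj hjl
    have hmono := List.pairwise_iff_getElem.mp hs
    have hxm : x ≤ a[mid] := by rw [hmv] at hge; omega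
    rcases Nat.lt_or_ge mid j with hc | hc
    · exact le_trans hxm (hmono mid j hmid hjl hc)
    · have : j = mid := by omega
      subst this; exact hxm
  | case3 lo hi h =>
    intro hle hhi hlo hhi2
    rw [lowerBoundLoop, dif_neg h]
    exact ⟨by omega, hlo, fun j hj hjl => hhi2 j (by omega) hjl⟩

theorem lower_bound_le_iff (a : List Int) (x : Int) (hs : a.Pairwise (· ≤ ·))
    (k : Nat) (hk : k < a.length) : lower_bound a x ≤ k ↔ x ≤ a[k] := by
  have h := lowerBoundLoop_spec a x hs 0 a.length (by omega) (le_refl _)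
    (by intro j hj _; omega) (by intro j hj hjl; omega)
  unfold lower_bound
  constructor
  · intro hle; exact h.2.2 k hle hk
  · intro hxk
    by_contra hc
    exact absurd (h.2.1 k (by omega) hk) (by omega)

theorem lt_lower_bound_iff (a : List Int) (x : Int) (hs : a.Pairwise (· ≤ ·))
    (k : Nat) (hk : k < a.length) : k < lower_bound a x ↔ a[k] < x := by
  have h := lower_bound_le_iff a x hs k hk
  constructor
  · intro hlt
    by_contra hc
    have := h.mpr (by omega); omega
  · intro hak
    by_contra hc
    have := h.mp (by omega); omega

theorem mapIdx_mapIdx' {α : Type} (l : List α) (f g : Nat → α → α) :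
    (l.mapIdx f).mapIdx g = l.mapIdx (fun k c => g k (f k c)) := by
  induction l generalizing f g with
  | nil => simp
  | cons a t ih => simp [List.mapIdx_cons, ih]

theorem mapIdx_id' {α : Type} : ∀ l : List α, l.mapIdx (fun _ c => c) = l := by
  intro l
  induction l with
  | nil => rfl
  | cons a t ih => rw [List.mapIdx_cons, ih]

theorem foldl_mapIdx_append (l : List Int) (lo hi : Int → Nat) (init : List (List Int)) :
    l.foldl (fun cs i => cs.mapIdx (fun k c => if lo i ≤ k ∧ k < hi i then c ++ [i] else c)) init
      = init.mapIdx (fun k c => c ++ l.filter (fun i => decide (lo i ≤ k ∧ k < hi i))) := by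
  induction l generalizing init with
  | nil =>
    simp only [List.foldl_nil, List.filter_nil, List.append_nil]
    exact (mapIdx_id' init).symm
  | cons a t ih =>
    rw [List.foldl_cons, ih, mapIdx_mapIdx']
    apply List.mapIdx_eq_mapIdx_iff.mpr
    intro k hk
    rw [List.filter_cons]
    by_cases hp : lo a ≤ k ∧ k < hi a
    · simp [hp]
    · simp [hp]

theorem zip_tail_sublist {α : Type} (p : α × α → Bool) :
    ∀ ts : List α, (((ts.zip ts.tail).filter p).map Prod.fst).Sublist ts := by
  intro ts
  induction ts with
  | nil => simp
  | cons a tl ih =>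
    cases tl with
    | nil => simp
    | cons b r =>
      have hz : (a :: b :: r).zip (a :: b :: r).tail = (a, b) :: ((b :: r).zip (b :: r).tail) := rfl
      rw [hz, List.filter_cons]
      by_cases hp : p (a, b)
      · simp only [hp, if_pos, List.map_cons]
        exact List.Sublist.cons₂ a ih
      · simp only [hp, if_neg, Bool.false_eq_true, not_false_iff]
        exact List.Sublist.cons a ih

-- ===== VERDICT (by name: the statement is the Claim_ definition above) =====
theorem get_cliques_spec : Claim_equal_get_cliques := by
  intro s e _hDom _hPre
  unfold Spec_get_cliques get_cliques get_cliques_alt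
  simp only [PySem.List.slice_from_one]
  set n : Int := (s.length : Int) with hn
  set tss : PySem.Set Int := PySem.Set.ofList s with htss
  set tes : PySem.Set Int := PySem.Set.ofList e with htes
  set ts : List Int := PySem.List.sorted (PySem.Set.union tss tes) (fun x => x) false with hts
  set ndts : List Int := ((ts.zip ts.tail).filter (fun p => tss.contains p.1 && tes.contains p.2)).map Prod.fst with hndts
  have hsort : ndts.Pairwise (· ≤ ·) := by
    have h1 : ts.Pairwise (fun a b => a ≤ b) := PySem.List.sorted_pairwise (PySem.Set.union tss tes) (fun x => x)
    exact List.Pairwise.sublist (zip_tail_sublist _ ts) h1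
  rw [foldl_mapIdx_append (PySem.List.pyRange 0 n 1)
    (fun i => lower_bound ndts (PySem.List.pyGetD s i 0))
    (fun i => lower_bound ndts (PySem.List.pyGetD e i 0))]
  apply List.ext_getElem
  · simp
  · intro k hk1 hk2
    have hklen : k < ndts.length := by simpa using hk1
    simp only [List.getElem_map, List.getElem_mapIdx]
    rw [List.nil_append]
    congr 1
    apply List.filter_congr
    intro i _
    rw [Bool.decide_and]
    have h1 : (PySem.List.pyGetD s i 0 ≤ ndts[k]) ↔ (lower_bound ndts (PySem.List.pyGetD s i 0) ≤ k) :=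
      (lower_bound_le_iff ndts _ hsort k hklen).symm
    have h2 : (ndts[k] < PySem.List.pyGetD e i 0) ↔ (k < lower_bound ndts (PySem.List.pyGetD e i 0)) :=
      (lt_lower_bound_iff ndts _ hsort k hklen).symm
    rw [decide_eq_decide.mpr h1, decide_eq_decide.mpr h2]
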